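-- pv_equiv track=rewrite | github.com/heartStrive/2021_TIANCHI_PANDA | code/train/reid/fast-reid/fastreid/data/datasets/panda.py | split_bboxes
-- ===== SOURCE A (Python) =====
-- def split_bboxes(bboxes):
--     train = []
--     test = []
--     for bbox in bboxes:
--         pid = bbox[1]
--         if pid < 7000:
--             train.append(bbox)
--         else:
--             test.append(bbox)
--
--     query = []
--     gallery = []
--     for bbox in test:
--         img = bbox[0]
--         pid = bbox[1]
--         camid = bbox[2]
--
--         fid = int(img.split("/")[-1].split("_")[1])
--         if fid % 3 == 0:
--             query.append((img, pid, 0))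
--         else:
--             gallery.append((img, pid, 1))
--
--     return train, query, gallery
-- ===== SOURCE B (Python) =====
-- def _fid(img):
--     return int(img.split("/")[-1].split("_")[1])
--
-- def split_bboxes(bboxes):
--     # Three declarative comprehensions over bboxes instead of imperative loops with appends.
--     train = [b for b in bboxes if b[1] < 7000]
--     query = [(img, pid, 0) for img, pid, _ in bboxes
--              if pid >= 7000 and _fid(img) % 3 == 0]
--     gallery = [(img, pid, 1) for img, pid, _ in bboxes
--                if pid >= 7000 and _fid(img) % 3 != 0]
--     return train, query, gallery
-- ===== Notes on version B (the rewrite author's own statement) =====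
-- stated objective: idiomatic
-- what changed: Replaces A's two imperative loops with mutable append accumulators (and the intermediate test list) by three declarative filter/map comprehensions directly over bboxes, one per output list.
import Mathlib
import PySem

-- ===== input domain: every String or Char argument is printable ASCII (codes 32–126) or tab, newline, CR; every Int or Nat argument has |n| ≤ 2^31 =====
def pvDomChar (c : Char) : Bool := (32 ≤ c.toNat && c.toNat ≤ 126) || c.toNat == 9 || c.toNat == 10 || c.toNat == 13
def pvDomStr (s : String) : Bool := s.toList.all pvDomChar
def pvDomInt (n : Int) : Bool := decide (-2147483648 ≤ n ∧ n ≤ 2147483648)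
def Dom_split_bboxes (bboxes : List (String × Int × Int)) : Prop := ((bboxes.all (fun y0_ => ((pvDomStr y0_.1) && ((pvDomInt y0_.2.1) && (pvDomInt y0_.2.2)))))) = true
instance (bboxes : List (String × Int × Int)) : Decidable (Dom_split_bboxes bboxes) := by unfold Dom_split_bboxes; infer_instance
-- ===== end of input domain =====

-- B replaces A's two imperative accumulator loops by three declarative filter/map comprehensions over bboxes (idiomatic decomposition; return value only).


-- shared helper: the pieces of img.split("/")[-1].split("_") (s.split(sep) with sep ≠ "" never fails, so .getD [] is exact)
def pvParts (img : String) : List String :=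
  (PySem.Str.split? (PySem.List.pyGetD ((PySem.Str.split? img "/").getD []) (-1) "") "_").getD []

-- shared helper: fid = int(img.split("/")[-1].split("_")[1]); total form, exact under Pre_split_bboxes
def pvFid (img : String) : Int :=
  (PySem.Int.ofStr? (PySem.List.pyGetD (pvParts img) 1 "")).getD 0

-- ===== PORT A =====
-- first loop: for bbox in bboxes: append to train or test
def stepA1 (acc : List (String × Int × Int) × List (String × Int × Int)) (b : String × Int × Int) :
    List (String × Int × Int) × List (String × Int × Int) :=
  if b.2.1 < 7000 then (acc.1 ++ [b], acc.2) else (acc.1, acc.2 ++ [b])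

-- second loop: for bbox in test: parse fid, append to query or gallery
def stepA2 (acc : List (String × Int × Int) × List (String × Int × Int)) (b : String × Int × Int) :
    List (String × Int × Int) × List (String × Int × Int) :=
  if PySem.Int.mod (pvFid b.1) 3 = 0 then (acc.1 ++ [(b.1, b.2.1, 0)], acc.2)
  else (acc.1, acc.2 ++ [(b.1, b.2.1, 1)])

def split_bboxes (bboxes : List (String × Int × Int)) : (List (String × Int × Int)) × (List (String × Int × Int)) × (List (String × Int × Int)) :=
  let p := bboxes.foldl stepA1 ([], [])
  let q := p.2.foldl stepA2 ([], [])
  (p.1, q.1, q.2)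

-- ===== PORT B =====
-- three comprehensions, one per output list (a Python comprehension with a filter and a
-- transformed element is exactly List.filter followed by List.map)
def split_bboxes_alt (bboxes : List (String × Int × Int)) : (List (String × Int × Int)) × (List (String × Int × Int)) × (List (String × Int × Int)) :=
  (bboxes.filter (fun b => decide (b.2.1 < 7000)),
   (bboxes.filter (fun b => decide (7000 ≤ b.2.1) && decide (PySem.Int.mod (pvFid b.1) 3 = 0))).map
     (fun b => (b.1, b.2.1, (0:Int))),
   (bboxes.filter (fun b => decide (7000 ≤ b.2.1) && !decide (PySem.Int.mod (pvFid b.1) 3 = 0))).map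
     (fun b => (b.1, b.2.1, (1:Int))))

-- ===== PRECONDITION & SPEC =====
-- Pre_ excludes exactly the inputs on which Python A raises: a bbox with pid ≥ 7000 whose
-- filename has no second "_"-piece after the last "/" (IndexError) or whose second piece
-- is not an int literal (ValueError). B raises there too.
def Pre_split_bboxes (bboxes : List (String × Int × Int)) : Prop :=
  ∀ b ∈ bboxes, ¬ b.2.1 < 7000 →
    2 ≤ (pvParts b.1).length ∧ (PySem.Int.ofStr? (PySem.List.pyGetD (pvParts b.1) 1 "")).isSome = true
instance (bboxes : List (String × Int × Int)) : Decidable (Pre_split_bboxes bboxes) := by unfold Pre_split_bboxes; infer_instance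

def pvWitness_split_bboxes : (List (String × Int × Int)) := [("a/b_3_c", 7000, 5), ("x", 1, 2)]

def Spec_split_bboxes (bboxes : List (String × Int × Int)) (out : (List (String × Int × Int)) × (List (String × Int × Int)) × (List (String × Int × Int))) : Prop := out = split_bboxes_alt bboxes
instance (bboxes : List (String × Int × Int)) (out : (List (String × Int × Int)) × (List (String × Int × Int)) × (List (String × Int × Int))) : Decidable (Spec_split_bboxes bboxes out) := by unfold Spec_split_bboxes; infer_instance

-- ===== CLAIM (what is proved, stated in full; the proofs are below) =====
def Claim_equal_split_bboxes : Prop := ∀ (bboxes : List (String × Int × Int)), Dom_split_bboxes bboxes → Pre_split_bboxes bboxes → Spec_split_bboxes bboxes (split_bboxes bboxes)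

-- ===== LEMMAS AND PROOFS =====

-- Characterisation of A's first loop: it partitions bboxes into the two filters.
theorem pv_A1_eq (l : List (String × Int × Int)) :
    ∀ tr te : List (String × Int × Int),
    List.foldl stepA1 (tr, te) l
      = (tr ++ l.filter (fun b => decide (b.2.1 < 7000)),
         te ++ l.filter (fun b => !decide (b.2.1 < 7000))) := by
  induction l with
  | nil => intro tr te; simp
  | cons b l ih =>
    intro tr te
    simp only [List.foldl_cons, List.filter_cons]
    by_cases h : b.2.1 < 7000 <;>
      simp [stepA1, h, ih]

-- Characterisation of A's second loop: query/gallery are maps over the fid%3 filters.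
theorem pv_A2_eq (l : List (String × Int × Int)) :
    ∀ q g : List (String × Int × Int),
    List.foldl stepA2 (q, g) l
      = (q ++ (l.filter (fun b => decide (PySem.Int.mod (pvFid b.1) 3 = 0))).map (fun b => (b.1, b.2.1, (0:Int))),
         g ++ (l.filter (fun b => !decide (PySem.Int.mod (pvFid b.1) 3 = 0))).map (fun b => (b.1, b.2.1, (1:Int)))) := by
  induction l with
  | nil => intro q g; simp
  | cons b l ih =>
    intro q g
    simp only [List.foldl_cons, List.filter_cons]
    by_cases h : (3:Int) ∣ pvFid b.1 <;>
      simp [stepA2, h, ih]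

-- the composed filter predicates of A and B coincide, pointwise
theorem pv_predQ (b : String × Int × Int) :
    (decide (PySem.Int.mod (pvFid b.1) 3 = 0) && !decide (b.2.1 < 7000))
      = (decide (7000 ≤ b.2.1) && decide (PySem.Int.mod (pvFid b.1) 3 = 0)) := by
  by_cases h : b.2.1 < 7000 <;> simp [h, Int.not_lt.mp, not_le.mpr]

theorem pv_predG (b : String × Int × Int) :
    (!decide (PySem.Int.mod (pvFid b.1) 3 = 0) && !decide (b.2.1 < 7000))
      = (decide (7000 ≤ b.2.1) && !decide (PySem.Int.mod (pvFid b.1) 3 = 0)) := by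
  by_cases h : b.2.1 < 7000 <;> simp [h, Int.not_lt.mp, not_le.mpr]

-- ===== VERDICT (by name: the statement is the Claim_ definition above) =====
theorem split_bboxes_spec : Claim_equal_split_bboxes := by
  intro bboxes _ _
  unfold Spec_split_bboxes split_bboxes split_bboxes_alt
  rw [pv_A1_eq]
  simp only [pv_A2_eq, List.nil_append, List.filter_filter, pv_predQ, pv_predG]
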